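-- pv_equiv track=rewrite | github.com/TShursh/Homework11 | AdditionalTask_Marks.py | count_number_occurrences
-- ===== SOURCE A (Python) =====
-- def count_number_occurrences(mark, marks):
--     count = 0
--     for i in range(len(marks)):
--         if mark == marks[i]:
--             count += 1
--         if not 0 <= marks[i] <= 5:
--             return -1
--     return count
-- ===== SOURCE B (Python) =====
-- def count_number_occurrences(mark, marks):
--     if any(not 0 <= x <= 5 for x in marks):
--         return -1
--     return marks.count(mark)
-- ===== Notes on version B (the rewrite author's own statement) =====
-- stated objective: simpler
-- what changed: Splits A's single interleaved count-and-validate index loop into a validity scan (any) followed by a library count.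
import Mathlib
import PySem

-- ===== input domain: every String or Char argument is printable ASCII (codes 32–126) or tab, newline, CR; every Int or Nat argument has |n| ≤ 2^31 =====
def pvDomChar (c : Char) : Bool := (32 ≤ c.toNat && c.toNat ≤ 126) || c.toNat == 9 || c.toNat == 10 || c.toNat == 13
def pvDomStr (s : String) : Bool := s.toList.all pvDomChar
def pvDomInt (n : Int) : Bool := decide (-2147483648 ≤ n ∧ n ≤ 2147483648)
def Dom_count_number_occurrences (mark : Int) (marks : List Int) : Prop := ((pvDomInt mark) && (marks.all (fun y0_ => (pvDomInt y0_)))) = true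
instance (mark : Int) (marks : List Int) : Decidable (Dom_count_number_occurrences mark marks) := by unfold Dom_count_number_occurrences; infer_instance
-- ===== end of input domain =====

-- B validates all marks first (any invalid → -1) then counts with a library count,
-- instead of A's interleaved count-and-validate index loop; objective: simpler.


-- ===== PORT A =====
-- A's index loop with early return, as structural recursion over the list
-- (marks[i] visits elements in order) carrying the running count.
def countA_loop (mark : Int) : List Int → Int → Int
  | [], count => count
  | x :: xs, count =>
      let count := if mark == x then count + 1 else count
      if ¬ (0 ≤ x ∧ x ≤ 5) then -1 else countA_loop mark xs count

def count_number_occurrences (mark : Int) (marks : List Int) : Int :=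
  countA_loop mark marks 0

-- ===== PORT B =====
def count_number_occurrences_alt (mark : Int) (marks : List Int) : Int :=
  if marks.any (fun x => ¬ (0 ≤ x ∧ x ≤ 5)) then -1
  else PySem.List.count marks mark

-- ===== PRECONDITION & SPEC =====
def Spec_count_number_occurrences (mark : Int) (marks : List Int) (out : Int) : Prop := out = count_number_occurrences_alt mark marks
instance (mark : Int) (marks : List Int) (out : Int) : Decidable (Spec_count_number_occurrences mark marks out) := by unfold Spec_count_number_occurrences; infer_instance

-- ===== CLAIM (what is proved, stated in full; the proofs are below) =====
def Claim_equal_count_number_occurrences : Prop := ∀ (mark : Int) (marks : List Int), Dom_count_number_occurrences mark marks → Spec_count_number_occurrences mark marks (count_number_occurrences mark marks)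

-- ===== LEMMAS AND PROOFS =====
theorem countA_loop_eq (mark : Int) (xs : List Int) (c : Int) :
    countA_loop mark xs c =
      if xs.any (fun x => ¬ (0 ≤ x ∧ x ≤ 5)) then -1 else c + (xs.count mark : Int) := by
  induction xs generalizing c with
  | nil => simp [countA_loop]
  | cons x xs ih =>
    simp only [countA_loop, List.any_cons, List.count_cons, ih]
    by_cases hx : 0 ≤ x ∧ x ≤ 5
    · by_cases hm : mark = x
      · subst hm
        simp [hx]
        split_ifs
        push_cast
        ring
      · have hne : (x == mark) = false := by
          simp; exact fun h => hm h.symm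
        simp [hx, hne, beq_iff_eq, hm]
    · simp [hx]

-- ===== VERDICT (by name: the statement is the Claim_ definition above) =====
theorem count_number_occurrences_spec : Claim_equal_count_number_occurrences := by
  intro mark marks _
  unfold Spec_count_number_occurrences count_number_occurrences count_number_occurrences_alt
  rw [countA_loop_eq]
  simp [PySem.List.count_eq]
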